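-- pv_equiv track=rewrite | github.com/0xHamza/Algoritma-Problemleri-Sorulari | Coderbyte/DiffrentCase to CamelCase.py | DifferentCases
-- ===== SOURCE A (Python) =====
-- def DifferentCases(strParam):
--
--   newStr = ''
--   finalWord = []
--
--   for char in strParam:
--     if char.isalpha():
--       newStr += char
--     else:
--       newStr += ' '
--
--   for word in newStr.split():
--     l = list(word)
--     l[0] = l[0].upper()
--     for i in range(1,len(l)):
--       l[i] = l[i].lower()
--     s="".join(l)
--     finalWord.append(s)
--
--
--   bas = list(finalWord[0])
--   bas[0] = bas[0].lower()
--   finalWord[0] = "".join(bas)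
--
--   return ''.join(finalWord)
-- ===== SOURCE B (Python) =====
-- def DifferentCases(strParam):
--     # One left-to-right pass: split and capitalize at the same time.
--     words = []
--     buf = []
--     for ch in strParam:
--         if ch.isalpha():
--             buf.append(ch.upper() if not buf else ch.lower())
--         elif buf:
--             words.append(''.join(buf))
--             buf = []
--     if buf:
--         words.append(''.join(buf))
--     words[0] = words[0][0].lower() + words[0][1:]
--     return ''.join(words)
-- ===== Notes on version B (the rewrite author's own statement) =====
-- stated objective: simpler
-- what changed: B replaces A's three passes (build a cleaned copy of the string, str.split() it, then re-case each word with an index loop) by a single left-to-right pass that splits and re-cases in one go with a word buffer.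
import Mathlib
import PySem

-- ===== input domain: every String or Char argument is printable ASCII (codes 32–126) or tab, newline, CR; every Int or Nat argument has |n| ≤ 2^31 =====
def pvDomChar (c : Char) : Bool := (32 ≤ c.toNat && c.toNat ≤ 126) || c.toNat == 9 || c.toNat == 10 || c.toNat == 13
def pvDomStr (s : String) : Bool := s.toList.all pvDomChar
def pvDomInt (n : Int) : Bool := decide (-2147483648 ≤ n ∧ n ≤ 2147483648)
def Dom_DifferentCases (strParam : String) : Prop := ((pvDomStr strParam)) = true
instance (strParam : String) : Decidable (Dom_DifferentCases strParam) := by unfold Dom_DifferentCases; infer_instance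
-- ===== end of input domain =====

-- B does A's camelCase job in ONE pass (split and re-case together) instead of A's
-- clean-then-split-then-recase passes; equal return value wherever both return (Pre_).

-- ===== PORT A =====
def DifferentCases (strParam : String) : String :=
  -- for char in strParam: newStr += char if char.isalpha() else ' '
  let newStr : List Char :=
    strParam.toList.foldl
      (fun acc c => acc ++ [if PySem.Chars.isalpha c then c else ' ']) []
  -- for word in newStr.split(): l[0] = l[0].upper(); for i in range(1, len(l)): l[i] = l[i].lower()
  let finalWord : List (List Char) :=
    (PySem.Chars.split₀ newStr).foldl
      (fun fw word =>
        let l := word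
        let l : List Char := match l with  -- l[0] = l[0].upper()  (split() words are nonempty)
          | [] => []
          | c :: cs => PySem.Chars.upperChar c :: cs
        let l := (PySem.List.pyRange 1 (l.length : Int) 1).foldl
          (fun acc i => acc.set i.toNat (PySem.Chars.lowerChar (acc.getD i.toNat ' '))) l
        fw ++ [l]) []
  match finalWord with
  | [] => ""  -- Python raises IndexError (finalWord[0]) here; excluded by Pre_
  | w :: ws =>
    let bas : List Char := match w with  -- bas[0] = bas[0].lower()
      | [] => []
      | c :: cs => PySem.Chars.lowerChar c :: cs
    String.ofList (PySem.Chars.join [] (bas :: ws))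

-- ===== PORT B =====
def DifferentCases_alt (strParam : String) : String :=
  let st : List (List Char) × List Char :=
    strParam.toList.foldl
      (fun (st : List (List Char) × List Char) ch =>
        if PySem.Chars.isalpha ch then
          (st.1, st.2 ++ [if st.2.isEmpty then PySem.Chars.upperChar ch
                          else PySem.Chars.lowerChar ch])
        else if st.2.isEmpty then st
        else (st.1 ++ [st.2], []))
      ([], [])
  let words := if st.2.isEmpty then st.1 else st.1 ++ [st.2]
  match words with
  | [] => ""  -- Source B raises IndexError (words[0]) here; excluded by Pre_
  | w :: ws =>
    let w : List Char := match w with  -- words[0] = words[0][0].lower() + words[0][1:]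
      | [] => []
      | c :: cs => PySem.Chars.lowerChar c :: cs
    String.ofList ((w :: ws).flatten)

-- ===== PRECONDITION & SPEC =====
-- Pre_ excludes strings with no alphabetic character: there both A and B raise IndexError.
def Pre_DifferentCases (strParam : String) : Prop :=
  strParam.toList.any PySem.Chars.isalpha = true
instance (strParam : String) : Decidable (Pre_DifferentCases strParam) := by
  unfold Pre_DifferentCases; infer_instance
def pvWitness_DifferentCases : String := "hello-World test"

def Spec_DifferentCases (strParam : String) (out : String) : Prop := out = DifferentCases_alt strParam
instance (strParam : String) (out : String) : Decidable (Spec_DifferentCases strParam out) := by unfold Spec_DifferentCases; infer_instance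

-- ===== CLAIM (what is proved, stated in full; the proofs are below) =====
def Claim_equal_DifferentCases : Prop := ∀ (strParam : String), Dom_DifferentCases strParam → Pre_DifferentCases strParam → Spec_DifferentCases strParam (DifferentCases strParam)

-- ===== LEMMAS AND PROOFS =====
theorem pv_set_take_drop (l : List Char) (k : Nat) (hk : k < l.length) (f : Char → Char) :
    (l.set k (f l[k])).take (k+1) ++ ((l.set k (f l[k])).drop (k+1)).map f
      = l.take k ++ (l.drop k).map f := by
  have hX : l.set k (f l[k]) = (l.take k ++ [f l[k]]) ++ l.drop (k+1) := by
    rw [List.set_eq_take_append_cons_drop, if_pos hk]; simp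
  have hlen : (l.take k ++ [f l[k]]).length = k + 1 := by
    simp [List.length_take_of_le hk.le]
  rw [hX, List.take_left' hlen, List.drop_left' hlen]
  simp only [List.append_assoc, List.singleton_append, List.map_drop]
  conv_rhs => rw [List.drop_eq_getElem_cons (show k < (l.map f).length by simpa using hk)]
  simp

theorem pv_lower_loop_aux : ∀ (n : Nat) (l : List Char) (k : Nat), l.length - k = n →
    (PySem.List.pyRange (k : Int) (l.length : Int) 1).foldl
        (fun acc i => acc.set i.toNat (PySem.Chars.lowerChar (acc.getD i.toNat ' '))) l
      = l.take k ++ (l.drop k).map PySem.Chars.lowerChar := by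
  intro n
  induction n with
  | zero =>
    intro l k hn
    rw [PySem.List.pyRange_one_eq_nil (by exact_mod_cast (show l.length ≤ k by omega))]
    rw [List.take_of_length_le (by omega), List.drop_eq_nil_of_le (by omega)]
    simp
  | succ n ih =>
    intro l k hn
    have hk : k < l.length := by omega
    rw [PySem.List.pyRange_one_cons (by exact_mod_cast hk)]
    simp only [List.foldl_cons, Int.toNat_natCast]
    have hget : l.getD k ' ' = l[k] := List.getD_eq_getElem l ' ' hk
    rw [hget]
    set l' := l.set k (PySem.Chars.lowerChar l[k]) with hl'
    have hlen : l'.length = l.length := by simp [hl']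
    have h1 : ((k : Int) + 1) = ((k + 1 : Nat) : Int) := by push_cast; ring
    have h2 : ((l.length : Nat) : Int) = ((l'.length : Nat) : Int) := by rw [hlen]
    rw [h1, h2, ih l' (k+1) (by omega)]
    exact pv_set_take_drop l k hk PySem.Chars.lowerChar

def pvCap : List Char → List Char
  | [] => []
  | c :: cs => PySem.Chars.upperChar c :: cs.map PySem.Chars.lowerChar

theorem pvCap_append_one (w : List Char) (c : Char) :
    pvCap (w ++ [c]) =
      pvCap w ++ [if w.isEmpty then PySem.Chars.upperChar c else PySem.Chars.lowerChar c] := by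
  cases w <;> simp [pvCap]

theorem pvCap_isEmpty (w : List Char) : (pvCap w).isEmpty = w.isEmpty := by
  cases w <;> simp [pvCap]

def pvFlush (st : List (List Char) × List Char) : List (List Char) :=
  if st.2.isEmpty then st.1 else st.1 ++ [st.2]

theorem pv_alpha_not_space (c : Char) (h : PySem.Chars.isalpha c = true) :
    PySem.Chars.isspace c = false := by
  simp [PySem.Chars.isalpha, PySem.Chars.isupper, PySem.Chars.islower, Char.le_def] at h
  simp only [PySem.Chars.isspace, Bool.or_eq_false_iff, Bool.and_eq_false_iff,
    decide_eq_false_iff_not]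
  simp [UInt32.le_iff_toNat_le] at h
  omega

theorem pv_main (l : List Char) : ∀ (cur : List Char) (acc : List (List Char)),
    pvFlush (l.foldl
      (fun (st : List (List Char) × List Char) ch =>
        if PySem.Chars.isalpha ch then
          (st.1, st.2 ++ [if st.2.isEmpty then PySem.Chars.upperChar ch
                          else PySem.Chars.lowerChar ch])
        else if st.2.isEmpty then st
        else (st.1 ++ [st.2], []))
      (acc.reverse.map pvCap, pvCap cur.reverse))
    = (PySem.Chars.split₀.go
        (l.map (fun c => if PySem.Chars.isalpha c then c else ' ')) cur acc).map pvCap := by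
  induction l with
  | nil =>
    intro cur acc
    simp only [List.foldl_nil, List.map_nil, PySem.Chars.split₀.go, pvFlush, pvCap_isEmpty,
      List.isEmpty_reverse]
    by_cases h : cur.isEmpty
    · simp [h]
    · simp [h]
  | cons c l ih =>
    intro cur acc
    rw [List.foldl_cons, List.map_cons]
    by_cases h : PySem.Chars.isalpha c = true
    · rw [if_pos h]
      dsimp only
      have heq : pvCap cur.reverse ++
          [if (pvCap cur.reverse).isEmpty then PySem.Chars.upperChar c
           else PySem.Chars.lowerChar c] = pvCap ((c :: cur).reverse) := by
        rw [List.reverse_cons, pvCap_append_one, pvCap_isEmpty, List.isEmpty_reverse]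
      rw [heq]
      rw [if_pos h, PySem.Chars.split₀.go, if_neg (by simp [pv_alpha_not_space c h])]
      exact ih (c :: cur) acc
    · rw [if_neg h]
      rw [if_neg h]
      rw [PySem.Chars.split₀.go, if_pos (show PySem.Chars.isspace ' ' = true by decide)]
      dsimp only
      have hbuf : (pvCap cur.reverse).isEmpty = cur.isEmpty := by
        rw [pvCap_isEmpty, List.isEmpty_reverse]
      rw [hbuf]
      by_cases hc : cur.isEmpty = true
      · rw [if_pos hc, if_pos hc]
        have hcur : cur = [] := List.isEmpty_iff.mp hc
        subst hcur
        exact ih [] acc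
      · rw [if_neg hc, if_neg hc]
        have heq : (acc.reverse.map pvCap ++ [pvCap cur.reverse], ([] : List Char))
            = ((cur.reverse :: acc).reverse.map pvCap, pvCap ([] : List Char).reverse) := by
          simp [pvCap]
        rw [heq]
        exact ih [] (cur.reverse :: acc)

theorem pv_clean_eq (l acc : List Char) :
    l.foldl (fun acc c => acc ++ [if PySem.Chars.isalpha c then c else ' ']) acc
      = acc ++ l.map (fun c => if PySem.Chars.isalpha c then c else ' ') := by
  induction l generalizing acc with
  | nil => simp
  | cons c l ih => simp [List.foldl, ih]

theorem pv_foldl_append_map {α β : Type} (f : α → β) (l : List α) (acc : List β) :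
    l.foldl (fun fw w => fw ++ [f w]) acc = acc ++ l.map f := by
  induction l generalizing acc with
  | nil => simp
  | cons x l ih => simp [List.foldl, ih]

theorem pv_capA_eq (w : List Char) :
    (PySem.List.pyRange 1 (((match w with
        | ([] : List Char) => ([] : List Char)
        | c :: cs => PySem.Chars.upperChar c :: cs) : List Char).length : Int) 1).foldl
      (fun acc i => acc.set i.toNat (PySem.Chars.lowerChar (acc.getD i.toNat ' ')))
      (match w with
        | ([] : List Char) => ([] : List Char)
        | c :: cs => PySem.Chars.upperChar c :: cs)
      = pvCap w := by
  cases w with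
  | nil =>
    rw [PySem.List.pyRange_one_eq_nil (by simp)]
    rfl
  | cons c cs =>
    have h := pv_lower_loop_aux ((PySem.Chars.upperChar c :: cs).length - 1)
      (PySem.Chars.upperChar c :: cs) 1 rfl
    simp only [Nat.cast_one] at h
    simp only []
    rw [h]
    simp [pvCap]

theorem pv_join_nil (l : List (List Char)) : PySem.Chars.join [] l = l.flatten := by
  induction l with
  | nil => rfl
  | cons x l ih =>
    cases l with
    | nil => simp [PySem.Chars.join, List.intercalate]
    | cons y t =>
      rw [PySem.Chars.join_cons_cons, ih]
      simp

theorem pv_final (E : List (List Char)) :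
    (match E with
      | [] => ""
      | w :: ws =>
        String.ofList (PySem.Chars.join []
          ((match w with
            | ([] : List Char) => ([] : List Char)
            | c :: cs => PySem.Chars.lowerChar c :: cs) :: ws)))
    = (match E with
      | [] => ""
      | w :: ws =>
        String.ofList (((match w with
            | ([] : List Char) => ([] : List Char)
            | c :: cs => PySem.Chars.lowerChar c :: cs) :: ws).flatten)) := by
  cases E with
  | nil => rfl
  | cons w ws => show String.ofList (PySem.Chars.join [] _) = _; rw [pv_join_nil]

-- ===== VERDICT (by name: the statement is the Claim_ definition above) =====
theorem DifferentCases_spec : Claim_equal_DifferentCases := by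
  intro s _ _
  unfold Spec_DifferentCases DifferentCases DifferentCases_alt
  dsimp only
  rw [pv_clean_eq, List.nil_append, pv_foldl_append_map, List.nil_append]
  rw [List.map_congr_left (fun w _ => pv_capA_eq w)]
  rw [show (([] : List (List Char)), ([] : List Char))
        = ((([] : List (List Char)).reverse.map pvCap : List (List Char)),
           pvCap (([] : List Char)).reverse) from rfl]
  rw [show (PySem.Chars.split₀
        (s.toList.map (fun c => if PySem.Chars.isalpha c then c else ' ')))
      = PySem.Chars.split₀.go
          (s.toList.map (fun c => if PySem.Chars.isalpha c then c else ' ')) [] [] from rfl]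
  rw [← pv_main s.toList [] []]
  unfold pvFlush
  exact pv_final _
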